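-- pv_equiv track=rewrite | github.com/olimpiadi-informatica/scolastiche | src/fibonacci-corso/6-programmazione-dinamica/contest/s-4-investi-meglio/testcases.py | solve
-- ===== SOURCE A (Python) =====
-- def solve(N,V,G):
--     reachable = [0]
--     for i in range(1,N):
--         for j in reachable:
--             if V[j] + (i-j)*G[j] > V[i]:
--                 reachable.append(i)
--                 break
--     return max(V[i] + (N-i)*G[i] for i in reachable)
-- ===== SOURCE B (Python) =====
-- def solve(N, V, G):
--     # Li Chao tree over x in [0, hi0]; node = [a, g, left, right] meaning line a + x*g
--     hi0 = N if N > 0 else 1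
--     root = [V[0], G[0], None, None]
--
--     def insert(a, g):
--         lo, hi = 0, hi0
--         node = root
--         while True:
--             m = (lo + hi) // 2
--             ca, cg = node[0], node[1]
--             if a + m * g > ca + m * cg:
--                 node[0], node[1] = a, g
--                 a, g = ca, cg
--             if lo == hi:
--                 return
--             if a + lo * g > node[0] + lo * node[1]:
--                 hi = m
--                 nxt = node[2]
--                 if nxt is None:
--                     node[2] = [a, g, None, None]
--                     return
--             else:
--                 lo = m + 1
--                 nxt = node[3]
--                 if nxt is None:
--                     node[3] = [a, g, None, None]
--                     return
--             node = nxt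
--
--     def query(x):
--         lo, hi = 0, hi0
--         node = root
--         best = None
--         while node is not None:
--             v = node[0] + x * node[1]
--             if best is None or v > best:
--                 best = v
--             m = (lo + hi) // 2
--             if x <= m:
--                 node = node[2]
--                 hi = m
--             else:
--                 node = node[3]
--                 lo = m + 1
--         return best
--
--     for i in range(1, N):
--         if query(i) > V[i]:
--             insert(V[i] - i * G[i], G[i])
--     return query(N)
-- ===== Notes on version B (the rewrite author's own statement) =====
-- stated objective: alternative
-- what changed: A rescans the whole list of reachable indices for every position i and once more for the final max; B maintains a Li Chao tree of the growth lines, so each reachability test and the final answer become single max-of-lines point queries (O(N log N) worst case vs A's O(N^2) worst case; A's early break makes it fast on typical random inputs, so B is not measurably faster there).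
import Mathlib
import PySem

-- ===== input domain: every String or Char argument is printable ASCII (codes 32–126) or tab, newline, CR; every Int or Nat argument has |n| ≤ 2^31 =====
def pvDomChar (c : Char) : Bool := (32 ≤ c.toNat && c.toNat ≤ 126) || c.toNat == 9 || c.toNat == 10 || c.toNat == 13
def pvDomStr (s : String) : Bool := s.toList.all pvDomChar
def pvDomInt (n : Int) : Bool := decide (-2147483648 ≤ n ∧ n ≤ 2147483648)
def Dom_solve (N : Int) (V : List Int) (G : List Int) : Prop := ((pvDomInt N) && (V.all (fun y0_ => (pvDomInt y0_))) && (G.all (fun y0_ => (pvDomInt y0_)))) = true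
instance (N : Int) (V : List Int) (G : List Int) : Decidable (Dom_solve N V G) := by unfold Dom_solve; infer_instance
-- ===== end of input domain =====

-- B replaces A's per-position rescan of all reachable lines by a Li Chao tree answering
-- max-of-lines queries; return values are proved equal on Pre_ (where A returns normally).


-- ===== PORT A =====
-- inner `for j in reachable: if …: append i; break` — true iff some j (scanned in order) passes the test
def pvAnyBreak (V G : List Int) (i : Int) : List Int → Bool
  | [] => false
  | j :: rest =>
      if PySem.List.pyGetD V j 0 + (i - j) * PySem.List.pyGetD G j 0 > PySem.List.pyGetD V i 0
      then true
      else pvAnyBreak V G i rest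

def solve (N : Int) (V : List Int) (G : List Int) : Int :=
  let reachable :=
    (PySem.List.pyRange 1 N 1).foldl
      (fun reachable i =>
        if pvAnyBreak V G i reachable then reachable ++ [i] else reachable)
      [0]
  -- max(V[i] + (N-i)*G[i] for i in reachable); reachable is never empty (it starts as [0])
  match reachable.map (fun i => PySem.List.pyGetD V i 0 + (N - i) * PySem.List.pyGetD G i 0) with
  | [] => 0
  | v :: vs => vs.foldl max v

-- ===== PORT B =====
-- Li Chao tree node: stored line (a, g) meaning a + x*g, left child, right child
inductive pvLCT : Type
  | nil : pvLCT
  | node : (Int × Int) → pvLCT → pvLCT → pvLCT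

def pvLineEval (ln : Int × Int) (x : Int) : Int := ln.1 + x * ln.2

def pvInsert (lo hi : Int) (ln : Int × Int) : pvLCT → pvLCT
  | .nil => .node ln .nil .nil
  | .node cur l r =>
      let m := PySem.Int.floordiv (lo + hi) 2
      let top := if pvLineEval ln m > pvLineEval cur m then ln else cur
      let bot := if pvLineEval ln m > pvLineEval cur m then cur else ln
      if lo = hi then .node top l r
      else if pvLineEval bot lo > pvLineEval top lo then .node top (pvInsert lo m bot l) r
      else .node top l (pvInsert (m + 1) hi bot r)

-- best-so-far accumulation of Source B's query loop: none = no line seen yet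
def pvOMax (o : Option Int) (v : Int) : Int :=
  match o with
  | none => v
  | some s => max v s

def pvQuery (lo hi x : Int) : pvLCT → Option Int
  | .nil => none
  | .node cur l r =>
      let m := PySem.Int.floordiv (lo + hi) 2
      let sub := if x ≤ m then pvQuery lo m x l else pvQuery (m + 1) hi x r
      some (pvOMax sub (pvLineEval cur x))

def solve_alt (N : Int) (V : List Int) (G : List Int) : Int :=
  let hi := if N > 0 then N else 1
  let root0 : pvLCT := .node (PySem.List.pyGetD V 0 0, PySem.List.pyGetD G 0 0) .nil .nil
  let root :=
    (PySem.List.pyRange 1 N 1).foldl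
      (fun root i =>
        -- query never returns none here: root always holds at least one line
        if (pvQuery 0 hi i root).getD 0 > PySem.List.pyGetD V i 0 then
          pvInsert 0 hi
            (PySem.List.pyGetD V i 0 - i * PySem.List.pyGetD G i 0, PySem.List.pyGetD G i 0)
            root
        else root)
      root0
  (pvQuery 0 hi N root).getD 0

-- ===== PRECONDITION & SPEC =====
-- Pre_ excludes exactly the inputs on which A raises IndexError: A reads V[0], G[0] and V[i], G[i] for 1 ≤ i < N.
def Pre_solve (N : Int) (V : List Int) (G : List Int) : Prop :=
  V ≠ [] ∧ G ≠ [] ∧ N ≤ (V.length : Int) ∧ N ≤ (G.length : Int)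
instance (N : Int) (V : List Int) (G : List Int) : Decidable (Pre_solve N V G) := by
  unfold Pre_solve; infer_instance

def pvWitness_solve : Int × List Int × List Int := (3, [1, 2, 3], [1, 0, 0])

def Spec_solve (N : Int) (V : List Int) (G : List Int) (out : Int) : Prop := out = solve_alt N V G
instance (N : Int) (V : List Int) (G : List Int) (out : Int) : Decidable (Spec_solve N V G out) := by
  unfold Spec_solve; infer_instance

-- ===== CLAIM (what is proved, stated in full; the proofs are below) =====
def Claim_equal_solve : Prop := ∀ (N : Int) (V : List Int) (G : List Int),
  Dom_solve N V G → Pre_solve N V G → Spec_solve N V G (solve N V G)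

-- ===== LEMMAS AND PROOFS =====

-- two lines agreeing in order at lo and at m keep that order on [lo, m]
theorem pvLine_between {p q : Int × Int} {lo m x : Int}
    (h1 : pvLineEval q lo ≤ pvLineEval p lo) (h2 : pvLineEval q m ≤ pvLineEval p m)
    (hx1 : lo ≤ x) (hx2 : x ≤ m) : pvLineEval q x ≤ pvLineEval p x := by
  simp only [pvLineEval] at *
  rcases lt_or_eq_of_le (le_trans hx1 hx2) with hlm | hlm
  · nlinarith [mul_nonneg (by linarith : (0:Int) ≤ p.1 + lo * p.2 - (q.1 + lo * q.2)) (by linarith : (0:Int) ≤ m - x),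
               mul_nonneg (by linarith : (0:Int) ≤ p.1 + m * p.2 - (q.1 + m * q.2)) (by linarith : (0:Int) ≤ x - lo),
               (by linarith : (0:Int) < m - lo)]
  · have hx : x = lo := by omega
    subst hx; linarith

-- a line that loses at lo and wins (ties) at m keeps winning for x ≥ m
theorem pvLine_beyond {p q : Int × Int} {lo m x : Int}
    (h1 : pvLineEval p lo < pvLineEval q lo) (h2 : pvLineEval q m ≤ pvLineEval p m)
    (hlm : lo ≤ m) (hx : m ≤ x) : pvLineEval q x ≤ pvLineEval p x := by
  simp only [pvLineEval] at *
  have hml : lo < m := by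
    rcases lt_or_eq_of_le hlm with h | h
    · exact h
    · subst h; linarith
  nlinarith [mul_nonneg (by linarith : (0:Int) ≤ p.1 + m * p.2 - (q.1 + m * q.2)) (by linarith : (0:Int) ≤ x - m),
             mul_nonneg (by linarith : (0:Int) ≤ q.1 + lo * q.2 - (p.1 + lo * p.2)) (by linarith : (0:Int) ≤ x - m),
             mul_pos (by linarith : (0:Int) < q.1 + lo * q.2 - (p.1 + lo * p.2)) (by linarith : (0:Int) < x - lo),
             (by linarith : (0:Int) < m - lo)]

-- Li Chao main lemma: inserting a line adds it to the max answered by query, for x in [lo, hi]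
theorem pvQuery_insert (t : pvLCT) : ∀ (lo hi x : Int) (ln : Int × Int),
    lo ≤ x → x ≤ hi →
    pvQuery lo hi x (pvInsert lo hi ln t) =
      some (pvOMax (pvQuery lo hi x t) (pvLineEval ln x)) := by
  induction t with
  | nil =>
      intro lo hi x ln hlo hhi
      simp [pvInsert, pvQuery, pvOMax]
  | node cur l r ihl ihr =>
      intro lo hi x ln hlo hhi
      have hlohi : lo ≤ hi := le_trans hlo hhi
      obtain ⟨hml, hmh⟩ := PySem.Int.floordiv_two_mid_bounds hlohi
      set m := PySem.Int.floordiv (lo + hi) 2 with hmdef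
      have hquery : ∀ (c : Int × Int) (l' r' : pvLCT), pvQuery lo hi x (.node c l' r') =
          some (pvOMax (if x ≤ m then pvQuery lo m x l' else pvQuery (m + 1) hi x r')
            (pvLineEval c x)) := fun c l' r' => rfl
      by_cases heq : lo = hi
      · -- leaf interval: x = m = lo
        have hmeq : m = lo := by
          rw [hmdef, PySem.Int.floordiv_eq_iff_of_pos (by omega)]; omega
        have hxm : x ≤ m := by omega
        have hxeq : x = m := by omega
        have hins : pvInsert lo hi ln (.node cur l r) =
            .node (if pvLineEval ln m > pvLineEval cur m then ln else cur) l r := by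
          simp only [pvInsert, ← hmdef, if_pos heq]
        rw [hins, hquery, hquery]; simp only [if_pos hxm]
        by_cases hc : pvLineEval ln m > pvLineEval cur m
        · rw [if_pos hc]
          have h1 : pvLineEval cur x ≤ pvLineEval ln x := by rw [hxeq]; exact le_of_lt hc
          cases pvQuery lo m x l <;> (simp [pvOMax]; try omega)
        · rw [if_neg hc]
          have h1 : pvLineEval ln x ≤ pvLineEval cur x := by rw [hxeq]; exact not_lt.mp hc
          cases pvQuery lo m x l <;> (simp [pvOMax]; try omega)
      · have hmlt : m < hi := by
          rw [hmdef, PySem.Int.floordiv_lt_iff_lt_mul (by omega)]; omega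
        by_cases hc : pvLineEval ln m > pvLineEval cur m
        · -- top = ln, bot = cur
          by_cases hside : pvLineEval cur lo > pvLineEval ln lo
          · have hins : pvInsert lo hi ln (.node cur l r) =
                .node ln (pvInsert lo m cur l) r := by
              simp only [pvInsert, ← hmdef, if_neg heq, if_pos hc, if_pos hside]
            rw [hins, hquery, hquery]
            by_cases hxm : x ≤ m
            · simp only [if_pos hxm]; rw [ihl lo m x cur hlo hxm]
            · simp only [if_neg hxm]
              have hcx : pvLineEval cur x ≤ pvLineEval ln x :=
                pvLine_beyond hside (le_of_lt hc) hml (by omega)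
              cases pvQuery (m + 1) hi x r <;> (simp [pvOMax]; try omega)
          · have hins : pvInsert lo hi ln (.node cur l r) =
                .node ln l (pvInsert (m + 1) hi cur r) := by
              simp only [pvInsert, ← hmdef, if_neg heq, if_pos hc, if_neg hside]
            rw [hins, hquery, hquery]
            by_cases hxm : x ≤ m
            · simp only [if_pos hxm]
              have hcx : pvLineEval cur x ≤ pvLineEval ln x :=
                pvLine_between (not_lt.mp hside) (le_of_lt hc) hlo hxm
              cases pvQuery lo m x l <;> (simp [pvOMax]; try omega)
            · simp only [if_neg hxm]; rw [ihr (m + 1) hi x cur (by omega) hhi]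
        · -- top = cur, bot = ln
          by_cases hside : pvLineEval ln lo > pvLineEval cur lo
          · have hins : pvInsert lo hi ln (.node cur l r) =
                .node cur (pvInsert lo m ln l) r := by
              simp only [pvInsert, ← hmdef, if_neg heq, if_neg hc, if_pos hside]
            rw [hins, hquery, hquery]
            by_cases hxm : x ≤ m
            · simp only [if_pos hxm]; rw [ihl lo m x ln hlo hxm]
              cases pvQuery lo m x l <;> (simp [pvOMax]; try omega)
            · simp only [if_neg hxm]
              have hcx : pvLineEval ln x ≤ pvLineEval cur x :=
                pvLine_beyond hside (not_lt.mp hc) hml (by omega)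
              cases pvQuery (m + 1) hi x r <;> (simp [pvOMax]; try omega)
          · have hins : pvInsert lo hi ln (.node cur l r) =
                .node cur l (pvInsert (m + 1) hi ln r) := by
              simp only [pvInsert, ← hmdef, if_neg heq, if_neg hc, if_neg hside]
            rw [hins, hquery, hquery]
            by_cases hxm : x ≤ m
            · simp only [if_pos hxm]
              have hcx : pvLineEval ln x ≤ pvLineEval cur x :=
                pvLine_between (not_lt.mp hside) (not_lt.mp hc) hlo hxm
              cases pvQuery lo m x l <;> (simp [pvOMax]; try omega)
            · simp only [if_neg hxm]; rw [ihr (m + 1) hi x ln (by omega) hhi]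
              cases pvQuery (m + 1) hi x r <;> (simp [pvOMax]; try omega)

-- A's test expression for index j at position x
def pvF (V G : List Int) (x j : Int) : Int :=
  PySem.List.pyGetD V j 0 + (x - j) * PySem.List.pyGetD G j 0

-- max of pvF over a nonempty index list (0 for [], unreachable)
def pvMaxF (V G : List Int) (x : Int) : List Int → Int
  | [] => 0
  | h :: t => t.foldl (fun a j => max a (pvF V G x j)) (pvF V G x h)

theorem pvAnyBreak_iff (V G : List Int) (i : Int) (js : List Int) :
    pvAnyBreak V G i js = true ↔ ∃ j ∈ js, pvF V G i j > PySem.List.pyGetD V i 0 := by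
  induction js with
  | nil => simp [pvAnyBreak]
  | cons h t ih =>
      simp only [pvAnyBreak]
      split
      · simp_all [pvF]
      · simp_all [pvF]

theorem pvFoldlMax_gt_iff (g : Int → Int) (v : Int) (t : List Int) : ∀ a : Int,
    (t.foldl (fun acc j => max acc (g j)) a > v ↔ a > v ∨ ∃ j ∈ t, g j > v) := by
  induction t with
  | nil => intro a; simp
  | cons h rest ih =>
      intro a
      simp only [List.foldl_cons, ih, List.mem_cons]
      constructor
      · rintro (hm | ⟨j, hj, hgt⟩)
        · by_cases hc : g h > v
          · exact Or.inr ⟨h, Or.inl rfl, hc⟩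
          · left; omega
        · exact Or.inr ⟨j, Or.inr hj, hgt⟩
      · rintro (hm | ⟨j, hj | hj, hgt⟩)
        · left; omega
        · subst hj; left; omega
        · exact Or.inr ⟨j, hj, hgt⟩

theorem pvMaxF_gt_iff (V G : List Int) (x v : Int) (h : Int) (t : List Int) :
    pvMaxF V G x (h :: t) > v ↔ ∃ j ∈ h :: t, pvF V G x j > v := by
  simp only [pvMaxF, pvFoldlMax_gt_iff, List.mem_cons]
  constructor
  · rintro (hm | ⟨j, hj, hgt⟩)
    · exact ⟨h, Or.inl rfl, hm⟩
    · exact ⟨j, Or.inr hj, hgt⟩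
  · rintro ⟨j, hj | hj, hgt⟩
    · subst hj; left; exact hgt
    · right; exact ⟨j, hj, hgt⟩

theorem pvMaxF_append (V G : List Int) (x i : Int) (h : Int) (t : List Int) :
    pvMaxF V G x ((h :: t) ++ [i]) = max (pvMaxF V G x (h :: t)) (pvF V G x i) := by
  simp [pvMaxF, List.foldl_append]

-- pairing two foldls over the same list by a relation
theorem pvFoldl_rel {α β : Type} (P : α → β → Prop) (fa : α → Int → α) (fb : β → Int → β) :
    ∀ (l : List Int), (∀ a b c, c ∈ l → P a b → P (fa a c) (fb b c)) →
    ∀ a b, P a b → P (l.foldl fa a) (l.foldl fb b) := by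
  intro l
  induction l with
  | nil => intro _ a b h; exact h
  | cons c rest ih =>
      intro hstep a b h
      exact ih (fun a b c' hc' => hstep a b c' (List.mem_cons_of_mem _ hc'))
        (fa a c) (fb b c) (hstep a b c List.mem_cons_self h)

-- the invariant tying A's reachable list to B's tree
def pvGood (V G : List Int) (hi : Int) (reach : List Int) (root : pvLCT) : Prop :=
  reach ≠ [] ∧ ∀ x : Int, 0 ≤ x → x ≤ hi →
    pvQuery 0 hi x root = some (pvMaxF V G x reach)

theorem pvLineEval_line (V G : List Int) (i x : Int) :
    pvLineEval (PySem.List.pyGetD V i 0 - i * PySem.List.pyGetD G i 0, PySem.List.pyGetD G i 0) x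
      = pvF V G x i := by
  simp [pvLineEval, pvF]; ring

theorem pvGood_init (V G : List Int) (hi : Int) :
    pvGood V G hi [0] (.node (PySem.List.pyGetD V 0 0, PySem.List.pyGetD G 0 0) .nil .nil) := by
  refine ⟨by simp, fun x hx0 hxh => ?_⟩
  have hq : pvQuery 0 hi x (.node (PySem.List.pyGetD V 0 0, PySem.List.pyGetD G 0 0) .nil .nil) =
      some (pvLineEval (PySem.List.pyGetD V 0 0, PySem.List.pyGetD G 0 0) x) := by
    simp [pvQuery, pvOMax]
  rw [hq]
  simp [pvLineEval, pvMaxF, pvF]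
  try ring

theorem pvGood_step (V G : List Int) (hi i : Int) (reach : List Int) (root : pvLCT)
    (h : pvGood V G hi reach root) (hi1 : 1 ≤ i) (hihi : i ≤ hi) :
    pvGood V G hi (if pvAnyBreak V G i reach then reach ++ [i] else reach)
      (if (pvQuery 0 hi i root).getD 0 > PySem.List.pyGetD V i 0 then
         pvInsert 0 hi
           (PySem.List.pyGetD V i 0 - i * PySem.List.pyGetD G i 0, PySem.List.pyGetD G i 0)
           root
       else root) := by
  obtain ⟨hne, hq⟩ := h
  obtain ⟨h0, t, rfl⟩ : ∃ h0 t, reach = h0 :: t := by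
    cases reach with
    | nil => exact absurd rfl hne
    | cons a b => exact ⟨a, b, rfl⟩
  rw [hq i (by omega) hihi]
  simp only [Option.getD_some]
  by_cases hcond : pvMaxF V G i (h0 :: t) > PySem.List.pyGetD V i 0
  · have hab : pvAnyBreak V G i (h0 :: t) = true :=
      (pvAnyBreak_iff V G i _).mpr ((pvMaxF_gt_iff V G i _ h0 t).mp hcond)
    rw [hab, if_pos hcond, if_pos rfl]

    refine ⟨by simp, fun x hx0 hxh => ?_⟩
    rw [pvQuery_insert root 0 hi x _ hx0 hxh, hq x hx0 hxh]
    rw [pvMaxF_append]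
    simp only [pvOMax, pvLineEval_line, Option.some.injEq]
    omega
  · have hab : pvAnyBreak V G i (h0 :: t) = false := by
      rw [← Bool.not_eq_true, pvAnyBreak_iff V G i _]
      intro hex
      exact hcond ((pvMaxF_gt_iff V G i _ h0 t).mpr hex)
    rw [hab, if_neg hcond]
    exact ⟨hne, hq⟩

-- ===== VERDICT (by name: the statement is the Claim_ definition above) =====
theorem solve_spec : Claim_equal_solve := by
  intro N V G _hdom _hpre
  show solve N V G = solve_alt N V G
  by_cases hN : N ≤ 1
  · -- range(1, N) is empty: both sides are the single line of index 0, evaluated at N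
    have hr : PySem.List.pyRange 1 N 1 = [] := PySem.List.pyRange_one_eq_nil hN
    simp only [solve, solve_alt, hr, List.foldl_nil, List.map]
    have hq : ∀ hi' : Int,
        pvQuery 0 hi' N (.node (PySem.List.pyGetD V 0 0, PySem.List.pyGetD G 0 0) .nil .nil) =
          some (pvLineEval (PySem.List.pyGetD V 0 0, PySem.List.pyGetD G 0 0) N) := by
      intro hi'; simp [pvQuery, pvOMax]
    rw [hq]
    simp [pvLineEval]
    try ring
  · have h2 : 2 ≤ N := by omega
    have hhi : (if N > 0 then N else 1) = N := if_pos (by omega)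
    simp only [solve, solve_alt, hhi]
    have hgood : pvGood V G N
        ((PySem.List.pyRange 1 N 1).foldl
          (fun reachable i =>
            if pvAnyBreak V G i reachable then reachable ++ [i] else reachable) [0])
        ((PySem.List.pyRange 1 N 1).foldl
          (fun root i =>
            if (pvQuery 0 N i root).getD 0 > PySem.List.pyGetD V i 0 then
              pvInsert 0 N
                (PySem.List.pyGetD V i 0 - i * PySem.List.pyGetD G i 0,
                  PySem.List.pyGetD G i 0) root
            else root)
          (.node (PySem.List.pyGetD V 0 0, PySem.List.pyGetD G 0 0) .nil .nil)) := by
      refine pvFoldl_rel (pvGood V G N) _ _ (PySem.List.pyRange 1 N 1) ?_ _ _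
        (pvGood_init V G N)
      intro a b c hc hab
      have hc' := (PySem.List.mem_pyRange_one).mp hc
      exact pvGood_step V G N c a b hab (by omega) (by omega)
    obtain ⟨hne, hq⟩ := hgood
    set reach := (PySem.List.pyRange 1 N 1).foldl
      (fun reachable i =>
        if pvAnyBreak V G i reachable then reachable ++ [i] else reachable) [0] with hreach
    obtain ⟨h0, t, hrt⟩ : ∃ h0 t, reach = h0 :: t := by
      cases hr : reach with
      | nil => exact absurd hr hne
      | cons a b => exact ⟨a, b, rfl⟩
    rw [hrt] at hq ⊢
    rw [hq N (by omega) (le_refl N)]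
    simp only [List.map_cons, Option.getD_some]
    rw [List.foldl_map]
    rfl
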